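-- pv_equiv track=rewrite | github.com/rcdat-rcisp/RCDAT-Coreference | Train/features-coref/Train.py | remove_null
-- ===== SOURCE A (Python) =====
-- def remove_null(p):
--     cnt=0
--     for i in range(len(p)):
--         if p[i][0]=='':
--             cnt+=1
--             p[i]=''
--     for i in range((cnt)):
--         p.remove('')
--     return p
-- ===== SOURCE B (Python) =====
-- def remove_null(p):
--     # In-place single-pass two-pointer compaction: keep elements whose first
--     # item is non-empty, writing them back at cursor w, then truncate.
--     w = 0
--     for x in p:
--         if x[0] != '':
--             p[w] = x
--             w += 1
--     del p[w:]
--     return p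
-- ===== Notes on version B (the rewrite author's own statement) =====
-- stated objective: simpler
-- what changed: Replaced A's two-phase mark-with-sentinel-then-repeated-list.remove pass by a single in-place two-pointer compaction (write cursor + one truncation).
-- outside the precondition, e.g. on remove_null([[]]): A raises IndexError, B raises IndexError
import Mathlib
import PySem

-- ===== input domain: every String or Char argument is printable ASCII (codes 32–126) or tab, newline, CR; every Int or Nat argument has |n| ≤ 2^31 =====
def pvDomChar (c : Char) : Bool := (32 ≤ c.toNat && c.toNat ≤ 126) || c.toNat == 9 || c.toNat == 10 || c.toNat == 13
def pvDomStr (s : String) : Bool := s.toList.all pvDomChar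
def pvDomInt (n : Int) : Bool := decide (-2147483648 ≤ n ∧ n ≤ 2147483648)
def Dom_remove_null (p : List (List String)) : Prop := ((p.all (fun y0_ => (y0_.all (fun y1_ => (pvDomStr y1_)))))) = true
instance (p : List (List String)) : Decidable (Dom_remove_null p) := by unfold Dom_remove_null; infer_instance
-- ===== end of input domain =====

-- B drops the sublists whose first element is '' by a single in-place two-pointer
-- compaction instead of A's mark-with-sentinel + repeated list.remove('').
-- Both Pythons mutate p in place; the equivalence proved here is about the return value.

-- ===== PORT A =====
-- Python A overwrites marked slots with the string '' (not a list) and later removes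
-- them; under Pre_ no real element is the empty list, so the sentinel '' is ported as [].
-- p[i][0] is ported as headI: on Pre_ inputs every sublist is nonempty, so this is exact
-- (on an empty sublist Python raises IndexError; such inputs are excluded by Pre_).
def removeNullLoop : Nat → List (List String) → List (List String)
  | 0, l => l
  | n + 1, l => removeNullLoop n ((PySem.List.remove? l ([] : List String)).getD l)

def remove_null (p : List (List String)) : List (List String) :=
  -- first loop: cnt accumulator + the marked list
  let st := p.foldl
    (fun (s : Nat × List (List String)) x =>
      if x.headI = "" then (s.1 + 1, s.2 ++ [([] : List String)]) else (s.1, s.2 ++ [x]))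
    (0, [])
  -- second loop: for i in range(cnt): p.remove('')
  removeNullLoop st.1 st.2

-- ===== PORT B =====
-- single pass with a write cursor: the written prefix is the accumulator; del p[w:] = return the prefix
def remove_null_alt (p : List (List String)) : List (List String) :=
  p.foldl (fun acc x => if x.headI ≠ "" then acc ++ [x] else acc) []

-- ===== PRECONDITION & SPEC =====
-- Pre_ excludes inputs containing an empty sublist: there p[i][0] / x[0] raises IndexError in both Pythons.
def Pre_remove_null (p : List (List String)) : Prop := (p.all (fun x => !x.isEmpty)) = true
instance (p : List (List String)) : Decidable (Pre_remove_null p) := by unfold Pre_remove_null; infer_instance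
def pvWitness_remove_null : List (List String) := [["a", "b"], [""], ["c"]]

def Spec_remove_null (p : List (List String)) (out : List (List String)) : Prop := out = remove_null_alt p
instance (p : List (List String)) (out : List (List String)) : Decidable (Spec_remove_null p out) := by unfold Spec_remove_null; infer_instance

-- ===== CLAIM (what is proved, stated in full; the proofs are below) =====
def Claim_equal_remove_null : Prop := ∀ (p : List (List String)), Dom_remove_null p → Pre_remove_null p → Spec_remove_null p (remove_null p)

-- ===== LEMMAS AND PROOFS =====

-- the marking function of A's first loop
def rnMark (x : List String) : List String := if x.headI = "" then [] else x

lemma removeNullLoop_cons (n : Nat) (x : List String) (t : List (List String)) (hx : x ≠ []) :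
    removeNullLoop n (x :: t) = x :: removeNullLoop n t := by
  induction n generalizing t with
  | zero => rfl
  | succ n ih =>
    cases h : PySem.List.remove? t ([] : List String) with
    | none =>
      have hn : removeNullLoop (n + 1) t = removeNullLoop n t := by
        simp [removeNullLoop, h]
      rw [hn]
      simp [removeNullLoop, PySem.List.remove?_cons_of_ne t hx, h, ih]
    | some t' =>
      simp [removeNullLoop, PySem.List.remove?_cons_of_ne t hx, h, ih]

lemma removeNullLoop_count (l : List (List String)) :
    removeNullLoop (l.count ([] : List String)) l = l.filter (fun x => !(x == ([] : List String))) := by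
  induction l with
  | nil => rfl
  | cons x t ih =>
    by_cases hx : x = ([] : List String)
    · subst hx
      simp only [List.count_cons_self]
      have h1 : removeNullLoop (t.count ([] : List String) + 1) (([] : List String) :: t)
          = removeNullLoop (t.count ([] : List String)) t := by
        simp [removeNullLoop, PySem.List.remove?_cons_self]
      rw [h1, ih]
      simp
    · rw [List.count_cons_of_ne (by simpa using (Ne.symm hx)),
          removeNullLoop_cons _ _ _ hx, ih]
      simp [hx]

lemma rn_fold_eq (p : List (List String)) (c : Nat) (l : List (List String)) :
    p.foldl
      (fun (s : Nat × List (List String)) x =>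
        if x.headI = "" then (s.1 + 1, s.2 ++ [([] : List String)]) else (s.1, s.2 ++ [x]))
      (c, l)
    = (c + (p.map rnMark).count ([] : List String), l ++ p.map rnMark) := by
  induction p generalizing c l with
  | nil => simp
  | cons x t ih =>
    by_cases hx : x.headI = ""
    · simp only [List.foldl_cons, if_pos hx, ih, List.map_cons]
      have hm : rnMark x = ([] : List String) := by simp [rnMark, hx]
      rw [hm]
      simp only [List.count_cons_self, Prod.mk.injEq]
      constructor
      · omega
      · simp
    · have hxe : x ≠ ([] : List String) := by
        intro h; subst h; simp at hx
      simp only [List.foldl_cons, if_neg hx, ih, List.map_cons]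
      have hm : rnMark x = x := by simp [rnMark, hx]
      rw [hm, List.count_cons_of_ne (by simpa using (Ne.symm hxe))]
      simp

lemma rn_filter_map (p : List (List String)) :
    (p.map rnMark).filter (fun x => !(x == ([] : List String)))
      = p.filter (fun x => !(x.headI == "")) := by
  induction p with
  | nil => rfl
  | cons x t ih =>
    have ih' : List.filter (fun x => !x.isEmpty) (List.map rnMark t)
        = List.filter (fun x => !(x.headI == "")) t := by simpa using ih
    by_cases hx : x.headI = ""
    · have hm : rnMark x = ([] : List String) := by simp [rnMark, hx]
      simp [hm, hx, ih']
    · have hxe : x ≠ ([] : List String) := by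
        intro h; subst h; simp at hx
      have hm : rnMark x = x := by simp [rnMark, hx]
      simp [hm, hx, hxe, ih']

lemma remove_null_eq_filter (p : List (List String)) :
    remove_null p = p.filter (fun x => !(x.headI == "")) := by
  unfold remove_null
  simp only [rn_fold_eq, Nat.zero_add, List.nil_append]
  rw [removeNullLoop_count, rn_filter_map]

lemma remove_null_alt_eq_filter (p : List (List String)) :
    remove_null_alt p = p.filter (fun x => !(x.headI == "")) := by
  unfold remove_null_alt
  have h : ∀ (q : List (List String)) (acc : List (List String)),
      q.foldl (fun acc x => if x.headI ≠ "" then acc ++ [x] else acc) acc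
        = acc ++ q.filter (fun x => !(x.headI == "")) := by
    intro q
    induction q with
    | nil => simp
    | cons x t ih =>
      intro acc
      rw [List.foldl_cons]
      by_cases hx : x.headI = ""
      · rw [if_neg (by simp [hx]), ih]
        simp [hx]
      · rw [if_pos hx, ih]
        simp [hx]
  simpa using h p []

-- ===== VERDICT (by name: the statement is the Claim_ definition above) =====
theorem remove_null_spec : Claim_equal_remove_null := by
  intro p _ _
  unfold Spec_remove_null
  rw [remove_null_eq_filter, remove_null_alt_eq_filter]
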